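-- pv_equiv track=rewrite | github.com/ItIsMrLaG/USE-2022-informat | Easy-home/a-10.11.21.py | returner
-- ===== SOURCE A (Python) =====
-- def returner(t:tuple):
--     helper = []
--     ans = []
--     for i in t:
--         if (i in helper):
--             if (i in ans):
--                 ans.pop(ans.index(i))
--             continue
--         helper.append(i)
--         ans.append(i)
--     return tuple(ans)
-- ===== SOURCE B (Python) =====
-- def returner(t: tuple):
--     # one counting pass, then keep the elements whose total count is 1
--     counts = {}
--     for x in t:
--         counts[x] = counts.get(x, 0) + 1
--     return tuple(x for x in t if counts[x] == 1)
-- ===== Notes on version B (the rewrite author's own statement) =====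
-- stated objective: faster
-- what changed: Replaces A's incremental seen/answer state machine (quadratic membership scans, pop on second sight) with one dict counting pass followed by a filter keeping elements whose total count is 1.
import Mathlib
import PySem

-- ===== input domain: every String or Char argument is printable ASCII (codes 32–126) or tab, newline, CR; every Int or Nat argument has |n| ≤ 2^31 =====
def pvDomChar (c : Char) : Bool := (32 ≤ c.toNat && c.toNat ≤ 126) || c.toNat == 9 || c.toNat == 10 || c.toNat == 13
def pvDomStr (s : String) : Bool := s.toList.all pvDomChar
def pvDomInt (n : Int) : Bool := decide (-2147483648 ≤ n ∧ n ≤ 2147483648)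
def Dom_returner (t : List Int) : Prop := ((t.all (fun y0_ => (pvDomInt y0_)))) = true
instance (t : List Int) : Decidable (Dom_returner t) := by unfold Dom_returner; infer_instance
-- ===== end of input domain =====

-- B replaces A's incremental seen/answer state machine (quadratic membership scans)
-- with one dict counting pass and a filter on the total count; same value everywhere.

-- ===== PORT A =====
-- the loop over t with the two accumulator lists `helper` and `ans`;
-- `ans.pop(ans.index(i))` removes the first occurrence of i from ans — since the branch
-- is only taken when i ∈ ans, this is exactly List.erase.
def returnerLoop : List Int → List Int → List Int → List Int
  | [], _, ans => ans
  | i :: rest, helper, ans =>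
    if i ∈ helper then
      if i ∈ ans then returnerLoop rest helper (ans.erase i)
      else returnerLoop rest helper ans
    else returnerLoop rest (helper ++ [i]) (ans ++ [i])

def returner (t : List Int) : List Int := returnerLoop t [] []

-- ===== PORT B =====
-- counts[x] is looked up only for x ∈ t, where the key is always present, so getD is exact
def returner_alt (t : List Int) : List Int :=
  let counts := t.foldl (fun d x => d.insert x (d.getD x 0 + 1)) (PySem.Dict.empty : PySem.Dict Int Int)
  t.filter (fun x => counts.getD x 0 == 1)

-- ===== PRECONDITION & SPEC =====
def Spec_returner (t : List Int) (out : List Int) : Prop := out = returner_alt t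
instance (t : List Int) (out : List Int) : Decidable (Spec_returner t out) := by unfold Spec_returner; infer_instance

-- ===== CLAIM (what is proved, stated in full; the proofs are below) =====
def Claim_equal_returner : Prop := ∀ (t : List Int), Dom_returner t → Spec_returner t (returner t)

-- ===== LEMMAS AND PROOFS =====

-- erasing the unique occurrence of i from a filtered list = filtering it out as well
lemma erase_filter_of_count_one (p : List Int) (i : Int)
    (pred : Int → Bool) (hpi : pred i = true) (h1 : p.count i = 1) :
    (p.filter pred).erase i = p.filter (fun x => pred x && !(x == i)) := by
  induction p with
  | nil => simp at h1
  | cons a r ih =>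
    by_cases hai : a = i
    · subst hai
      have hr : r.count a = 0 := by
        have h : (a :: r).count a = r.count a + 1 := by simp
        omega
      have hnot : a ∉ r := List.count_eq_zero.mp hr
      rw [List.filter_cons_of_pos hpi, List.erase_cons_head,
          List.filter_cons_of_neg (by simp)]
      apply List.filter_congr
      intro x hx
      have hxa : x ≠ a := by rintro rfl; exact hnot hx
      simp [hxa]
    · have hne : (i == a) = false := by
        simp only [beq_eq_false_iff_ne, ne_eq]
        exact fun h => hai h.symm
      have h1' : r.count i = 1 := by
        simpa [List.count_cons, hai] using h1
      by_cases hpa : pred a = true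
      · rw [List.filter_cons_of_pos hpa,
            List.erase_cons_tail (by simp [hai]),
            List.filter_cons_of_pos (by simp [hpa, hai]), ih h1']
      · rw [List.filter_cons_of_neg hpa,
            List.filter_cons_of_neg (by simp [hpa]), ih h1']

-- extending the prefix by one element rewrites the count-1 filter of the prefix
lemma filter_snoc_mem_one (p : List Int) (i : Int) (h1 : p.count i = 1) :
    (p.filter (fun x => p.count x == 1)).erase i
      = (p ++ [i]).filter (fun x => (p ++ [i]).count x == 1) := by
  rw [erase_filter_of_count_one p i _ (by simp [h1]) h1, List.filter_append]
  have hri : ((p ++ [i]).count i == 1) = false := by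
    simp [List.count_append, h1]
  rw [List.filter_cons_of_neg (by simpa using hri), List.filter_nil, List.append_nil]
  apply List.filter_congr
  intro x hx
  by_cases hxi : x = i
  · subst hxi; simpa using hri
  · have h0 : List.count x [i] = 0 := List.count_eq_zero.mpr (by simp [hxi])
    simp [List.count_append, h0, hxi]

lemma filter_snoc_mem_many (p : List Int) (i : Int) (hip : i ∈ p)
    (h1 : p.count i ≠ 1) :
    p.filter (fun x => p.count x == 1)
      = (p ++ [i]).filter (fun x => (p ++ [i]).count x == 1) := by
  have hc2 : 2 ≤ p.count i := by
    have := List.one_le_count_iff.mpr hip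
    omega
  have hri : ((p ++ [i]).count i == 1) = false := by
    simp [List.count_append]; omega
  rw [List.filter_append, List.filter_cons_of_neg (by simpa using hri),
      List.filter_nil, List.append_nil]
  apply List.filter_congr
  intro x hx
  by_cases hxi : x = i
  · subst hxi
    have : (p.count x == 1) = false := by simp [h1]
    simpa [this] using hri
  · have h0 : List.count x [i] = 0 := List.count_eq_zero.mpr (by simp [hxi])
    simp [List.count_append, h0]

lemma filter_snoc_fresh (p : List Int) (i : Int) (hip : i ∉ p) :
    p.filter (fun x => p.count x == 1) ++ [i]
      = (p ++ [i]).filter (fun x => (p ++ [i]).count x == 1) := by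
  have h0 : p.count i = 0 := List.count_eq_zero.mpr hip
  have hri : ((p ++ [i]).count i == 1) = true := by
    simp [List.count_append, h0]
  rw [List.filter_append, List.filter_cons_of_pos (by simpa using hri), List.filter_nil]
  congr 1
  apply List.filter_congr
  intro x hx
  have hxi : x ≠ i := by rintro rfl; exact hip hx
  have hz : List.count x [i] = 0 := List.count_eq_zero.mpr (by simp [hxi])
  simp [List.count_append, hz]

-- main loop invariant: if helper's members are exactly the prefix p's members and
-- ans = the count-1 filter of p, the loop computes the count-1 filter of p ++ rest.
lemma loop_invariant (rest : List Int) : ∀ (p helper : List Int),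
    (∀ x, x ∈ helper ↔ x ∈ p) →
    returnerLoop rest helper (p.filter (fun x => p.count x == 1))
      = (p ++ rest).filter (fun x => (p ++ rest).count x == 1) := by
  induction rest with
  | nil => intro p helper _; simp [returnerLoop]
  | cons i r ih =>
    intro p helper hmem
    have hassoc : (p ++ [i]) ++ r = p ++ i :: r := by simp
    by_cases hip : i ∈ p
    · have hih : i ∈ helper := (hmem i).mpr hip
      have hmem' : ∀ x, x ∈ helper ↔ x ∈ p ++ [i] := by
        intro x
        rw [hmem x]
        simp only [List.mem_append, List.mem_singleton]
        exact ⟨Or.inl, fun h => h.elim id (fun hx => hx ▸ hip)⟩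
      by_cases h1 : p.count i = 1
      · have hians : i ∈ p.filter (fun x => p.count x == 1) := by
          simp [List.mem_filter, hip, h1]
        have step : returnerLoop (i :: r) helper (p.filter (fun x => p.count x == 1))
            = returnerLoop r helper ((p.filter (fun x => p.count x == 1)).erase i) := by
          simp only [returnerLoop, if_pos hih, if_pos hians]
        rw [step, filter_snoc_mem_one p i h1, ← hassoc]
        exact ih (p ++ [i]) helper hmem'
      · have hians : i ∉ p.filter (fun x => p.count x == 1) := by
          simp [List.mem_filter, h1]
        have step : returnerLoop (i :: r) helper (p.filter (fun x => p.count x == 1))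
            = returnerLoop r helper (p.filter (fun x => p.count x == 1)) := by
          simp only [returnerLoop, if_pos hih, if_neg hians]
        rw [step, filter_snoc_mem_many p i hip h1, ← hassoc]
        exact ih (p ++ [i]) helper hmem'
    · have hih : i ∉ helper := fun h => hip ((hmem i).mp h)
      have hmem' : ∀ x, x ∈ helper ++ [i] ↔ x ∈ p ++ [i] := by
        intro x
        simp only [List.mem_append, List.mem_singleton, hmem x]
      have step : returnerLoop (i :: r) helper (p.filter (fun x => p.count x == 1))
          = returnerLoop r (helper ++ [i]) (p.filter (fun x => p.count x == 1) ++ [i]) := by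
        simp only [returnerLoop, if_neg hih]
      rw [step, filter_snoc_fresh p i hip, ← hassoc]
      exact ih (p ++ [i]) (helper ++ [i]) hmem'

-- ===== VERDICT (by name: the statement is the Claim_ definition above) =====
theorem returner_spec : Claim_equal_returner := by
  intro t _
  unfold Spec_returner returner returner_alt
  have hA : returnerLoop t [] [] = t.filter (fun x => t.count x == 1) := by
    simpa using loop_invariant t [] [] (by simp)
  rw [hA]
  apply List.filter_congr
  intro x hx
  simp [PySem.Dict.getD_foldl_insert_add_one]
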